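-- pv_equiv track=rewrite | github.com/kokter/TProgramming_2024 | codewars/Build Tower/4.py | tower_builder
-- ===== SOURCE A (Python) =====
-- def tower_builder(n_floors):
--     tower = []
--     for i in range(n_floors):
--         num_spaces = n_floors - i - 1
--         num_asterisks = 2 * i + 1
--
--         floor = ' ' * num_spaces + '*' * num_asterisks + ' ' * num_spaces
--
--         tower.append(floor)
--
--     return tower
-- ===== SOURCE B (Python) =====
-- def tower_builder(n_floors):
--     if n_floors <= 0:
--         return []
--     width = 2 * n_floors - 1
--     chars = ['*'] * width
--     rows = []
--     for i in range(n_floors):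
--         rows.append(''.join(chars))
--         chars[i] = ' '
--         chars[width - 1 - i] = ' '
--     rows.reverse()
--     return rows
-- ===== Notes on version B (the rewrite author's own statement) =====
-- stated objective: alternative
-- what changed: Instead of computing each row's padding independently, B maintains one mutable character array starting as the full bottom row, emits a row then blanks the outermost asterisk on each side per floor, and reverses the collected rows at the end.
import Mathlib
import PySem

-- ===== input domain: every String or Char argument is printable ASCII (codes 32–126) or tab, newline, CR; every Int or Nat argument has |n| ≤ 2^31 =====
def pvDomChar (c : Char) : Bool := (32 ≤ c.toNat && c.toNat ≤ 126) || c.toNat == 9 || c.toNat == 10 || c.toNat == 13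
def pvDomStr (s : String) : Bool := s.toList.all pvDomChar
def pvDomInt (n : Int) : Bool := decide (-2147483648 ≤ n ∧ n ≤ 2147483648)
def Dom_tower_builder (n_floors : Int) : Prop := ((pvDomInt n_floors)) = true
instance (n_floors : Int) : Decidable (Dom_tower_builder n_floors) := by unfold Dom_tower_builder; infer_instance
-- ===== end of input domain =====

-- B replaces A's per-row padding computation by one mutable char array: start from the full bottom row, emit a row and blank the outermost '*' on each side per floor, reverse the rows at the end; same cost, different algorithm.

-- ===== PORT A =====
-- Python string repetition/concatenation ported exactly on the character-list level (String.ofList of the concatenated char lists).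
def tower_builder (n_floors : Int) : List String :=
  (PySem.List.pyRange 0 n_floors 1).foldl
    (fun tower i =>
      let num_spaces := n_floors - i - 1
      let num_asterisks := 2 * i + 1
      let floor := String.ofList (List.replicate num_spaces.toNat ' ' ++
                                  List.replicate num_asterisks.toNat '*' ++
                                  List.replicate num_spaces.toNat ' ')
      tower ++ [floor])
    []

-- ===== PORT B =====
-- ''.join(chars) is String.ofList; chars[j] = ' ' is PySem.List.pySetD (indices are always in range here).
def tower_builder_alt (n_floors : Int) : List String :=
  if n_floors ≤ 0 then []
  else
    let width := 2 * n_floors - 1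
    let res := (PySem.List.pyRange 0 n_floors 1).foldl
      (fun (st : List Char × List String) i =>
        (PySem.List.pySetD (PySem.List.pySetD st.1 i ' ') (width - 1 - i) ' ',
         st.2 ++ [String.ofList st.1]))
      (List.replicate width.toNat '*', [])
    res.2.reverse

-- ===== PRECONDITION & SPEC =====
def Spec_tower_builder (n_floors : Int) (out : List String) : Prop := out = tower_builder_alt n_floors
instance (n_floors : Int) (out : List String) : Decidable (Spec_tower_builder n_floors out) := by unfold Spec_tower_builder; infer_instance

-- ===== CLAIM (what is proved, stated in full; the proofs are below) =====
def Claim_equal_tower_builder : Prop := ∀ (n_floors : Int), Dom_tower_builder n_floors → Spec_tower_builder n_floors (tower_builder n_floors)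

-- ===== LEMMAS AND PROOFS =====

/-- The k-th floor of an m-floor tower, as a closed form both ports reach. -/
def pvFloor (m k : Nat) : String :=
  String.ofList (List.replicate (m - 1 - k) ' ' ++ List.replicate (2 * k + 1) '*' ++
                 List.replicate (m - 1 - k) ' ')

/-- B's character array after i floors have been emitted. -/
def pvCdef (m i : Nat) : List Char :=
  (List.range (2 * m - 1)).map (fun p => if i ≤ p ∧ p + i < 2 * m - 1 then '*' else ' ')

theorem pvFoldAppend {α β : Type} (f : α → β) :
    ∀ (xs : List α) (acc : List β),
      xs.foldl (fun t i => t ++ [f i]) acc = acc ++ xs.map f := by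
  intro xs
  induction xs with
  | nil => simp
  | cons x xs ih => intro acc; simp [List.foldl, ih]

theorem pvA_eq (m : Nat) :
    tower_builder (m : Int) = (List.range m).map (pvFloor m) := by
  unfold tower_builder
  rw [PySem.List.pyRange_one]
  simp only [Int.sub_zero, Int.toNat_natCast]
  rw [pvFoldAppend]
  simp only [List.nil_append, List.map_map]
  apply List.map_congr_left
  intro k hk
  rw [List.mem_range] at hk
  simp only [Function.comp_apply, pvFloor, zero_add]
  have e1 : ((m : Int) - (k : Int) - 1).toNat = m - 1 - k := by omega
  have e2 : (2 * (k : Int) + 1).toNat = 2 * k + 1 := by omega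
  rw [e1, e2]

theorem pvRepForm (a b : Nat) :
    List.replicate a ' ' ++ List.replicate b '*' ++ List.replicate a ' ' =
      (List.range (a + b + a)).map (fun p => if a ≤ p ∧ p < a + b then '*' else ' ') := by
  apply List.ext_getElem
  · simp; omega
  · intro p h1 h2
    simp only [List.getElem_map, List.getElem_range, List.getElem_append,
      List.length_append, List.length_replicate] at *
    split_ifs <;> simp_all [List.getElem_replicate] <;> omega

theorem pvCdef_zero (m : Nat) : pvCdef m 0 = List.replicate (2 * m - 1) '*' := by
  unfold pvCdef
  rw [List.map_congr_left (g := fun _ => '*')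
      (fun p hp => by rw [List.mem_range] at hp; rw [if_pos ⟨Nat.zero_le _, by omega⟩])]
  simp [List.map_const']

theorem pvRow (m k : Nat) (hk : k < m) :
    pvCdef m k =
      List.replicate k ' ' ++ List.replicate (2 * m - 1 - 2 * k) '*' ++ List.replicate k ' ' := by
  have hw : k + (2 * m - 1 - 2 * k) + k = 2 * m - 1 := by omega
  rw [pvRepForm, hw]
  unfold pvCdef
  apply List.map_congr_left
  intro p hp
  rw [List.mem_range] at hp
  exact if_congr (by constructor <;> (intro h; exact ⟨h.1, by omega⟩)) rfl rfl

theorem pvStep (m k : Nat) (hk : k < m) :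
    ((pvCdef m k).set k ' ').set (2 * m - 1 - 1 - k) ' ' = pvCdef m (k + 1) := by
  apply List.ext_getElem
  · simp [pvCdef]
  · intro p h1 h2
    have hp : p < 2 * m - 1 := by simpa [pvCdef] using h2
    simp only [pvCdef, List.getElem_set, List.getElem_map, List.getElem_range]
    split_ifs <;> first | rfl | omega

theorem pvInv (m : Nat) (hm : 1 ≤ m) :
    ∀ (j : Nat), j ≤ m →
      (List.range j).foldl
        (fun (st : List Char × List String) (k : Nat) =>
          (PySem.List.pySetD (PySem.List.pySetD st.1 ((0 : Int) + (k : Int)) ' ')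
             (2 * (m : Int) - 1 - 1 - ((0 : Int) + (k : Int))) ' ',
           st.2 ++ [String.ofList st.1]))
        (List.replicate (2 * (m : Int) - 1).toNat '*', [])
      = (pvCdef m j, (List.range j).map (fun k => String.ofList (pvCdef m k))) := by
  intro j
  induction j with
  | zero =>
    intro _
    have ht : (2 * (m : Int) - 1).toNat = 2 * m - 1 := by omega
    simp [ht, pvCdef_zero]
  | succ j ih =>
    intro hj
    rw [List.range_succ, List.foldl_append, ih (by omega)]
    simp only [List.foldl_cons, List.foldl_nil, zero_add]
    have h1 : PySem.List.pySetD (pvCdef m j) ((j : Nat) : Int) ' ' = (pvCdef m j).set j ' ' := by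
      simp [PySem.List.pySetD_natCast]
    have hnn : (0 : Int) ≤ 2 * (m : Int) - 1 - 1 - (j : Int) := by omega
    have h2 : (2 * (m : Int) - 1 - 1 - (j : Int)).toNat = 2 * m - 1 - 1 - j := by omega
    rw [h1, PySem.List.pySetD_of_nonneg _ ' ' hnn, h2, pvStep m j (by omega)]
    simp

theorem pvB_eq (m : Nat) (hm : 1 ≤ m) :
    tower_builder_alt (m : Int) = (List.range m).map (pvFloor m) := by
  unfold tower_builder_alt
  rw [if_neg (by omega)]
  rw [PySem.List.pyRange_one]
  simp only [Int.sub_zero, Int.toNat_natCast]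
  rw [List.foldl_map, pvInv m hm m (le_refl m)]
  apply List.ext_getElem
  · simp
  · intro p h1 h2
    have hp : p < m := by simpa using h2
    have hl : ((List.range m).map (fun k => String.ofList (pvCdef m k))).length = m := by simp
    rw [List.getElem_reverse]
    simp only [List.getElem_map, List.getElem_range, hl, pvFloor]
    rw [pvRow m (m - 1 - p) (by omega)]
    have e2 : 2 * m - 1 - 2 * (m - 1 - p) = 2 * p + 1 := by omega
    rw [e2]

-- ===== VERDICT (by name: the statement is the Claim_ definition above) =====
theorem tower_builder_spec : Claim_equal_tower_builder := by
  intro n _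
  unfold Spec_tower_builder
  by_cases h : n ≤ 0
  · rw [tower_builder_alt, if_pos h]
    unfold tower_builder
    rw [PySem.List.pyRange_one_eq_nil (by omega)]
    rfl
  · have hn : n = ((n.toNat : Nat) : Int) := by omega
    rw [hn, pvA_eq, pvB_eq _ (by omega)]
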